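-- pv_equiv track=rewrite | github.com/VladimirDimitrov1957/CWE-ontology-generator | cpe.py | _add_quoting
-- ===== SOURCE A (Python) =====
-- def _add_quoting(s):
--     #Inspect each character in string s. Copy quoted characters, with their escaping, into the result.
--     #Look for unquoted non alphanumerics and if not "*" or "?", add escaping.
--
--     result = ""
--     idx = 0
--     while (idx < len(s)):
--         c = s[idx]
--         if c == "\\":
--             #Anything quoted in the bound string stays quoted in the unbound string.
--             result += s[idx: idx + 2]
--             idx += 2
--             continue
--
--         #Alphanumeric characters pass untouched.
--
--         #An unquoted asterisk must appear at the beginning or end of the string.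
--         #An unquoted question mark must appear at the beginning or end of the string, or in a leading or trailing sequence.
--         #The FS is checked for that.
--
--         if c.isalnum() or c == "_" or c == "*" or c == "?":
--             result += c
--             idx += 1
--             continue
--
--         #All other characters must be quoted.
--         result += "\\" + c
--         idx += 1
--     return result
-- ===== SOURCE B (Python) =====
-- def _add_quoting(s):
--     # Tokenize into backslash-escape pairs and single characters, then classify
--     # each token once and join: no index/escape-skip state machine.
--     it = iter(s)
--     toks = [c + next(it, '') if c == '\\' else c for c in it]
--     return ''.join(t if t[0] == '\\' or t.isalnum() or t in '_*?' else '\\' + t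
--                    for t in toks)
-- ===== Notes on version B (the rewrite author's own statement) =====
-- stated objective: idiomatic
-- what changed: Replaces the index-based while loop with escape-skip accumulator concatenation by a tokenize-then-classify pipeline: an iterator splits the string into escape-pair / single-char tokens, and a join over a comprehension quotes each token.
import Mathlib
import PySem

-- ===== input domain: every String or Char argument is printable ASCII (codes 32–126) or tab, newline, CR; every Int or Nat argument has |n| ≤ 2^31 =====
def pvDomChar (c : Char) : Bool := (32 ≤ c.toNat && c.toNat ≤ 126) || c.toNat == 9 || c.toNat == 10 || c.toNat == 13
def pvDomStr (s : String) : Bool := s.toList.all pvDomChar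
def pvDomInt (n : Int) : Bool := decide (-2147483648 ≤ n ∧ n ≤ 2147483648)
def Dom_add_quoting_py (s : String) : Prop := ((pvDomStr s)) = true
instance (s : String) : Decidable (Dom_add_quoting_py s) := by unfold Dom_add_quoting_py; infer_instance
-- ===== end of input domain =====

-- B tokenizes into escape pairs / single chars and joins a classifying comprehension,
-- replacing A's index/escape-skip state machine; same values (idiomatic rewrite).

-- ===== PORT A =====
-- A's while loop over idx with accumulator `result`; the remaining suffix s[idx:]
-- is the recursion argument, `s[idx:idx+2]` is `take 2` of it.
def addqALoop (rem : List Char) (result : List Char) : List Char :=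
  match rem with
  | [] => result
  | c :: rest =>
    if c = '\\' then
      addqALoop (rest.drop 1) (result ++ (c :: rest).take 2)
    else if PySem.Chars.isalnum c || c = '_' || c = '*' || c = '?' then
      addqALoop rest (result ++ [c])
    else
      addqALoop rest (result ++ ['\\', c])
termination_by rem.length
decreasing_by
  all_goals simp

def add_quoting_py (s : String) : String := String.ofList (addqALoop s.toList [])

-- ===== PORT B =====
-- B's tokenizer (the iterator comprehension): a backslash consumes the next
-- character from the iterator ('' at the end), anything else is one token.
def pvTokens : List Char → List (List Char)
  | [] => []
  | '\\' :: [] => [['\\']]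
  | '\\' :: d :: rest => ['\\', d] :: pvTokens rest
  | c :: rest => [c] :: pvTokens rest

-- B's per-token classification (tokens are never empty: t[0] is head?).
def pvQuote (t : List Char) : List Char :=
  if t.head? = some '\\' || PySem.Chars.strIsalnum t || PySem.Chars.isIn t ['_', '*', '?'] then
    t
  else
    '\\' :: t

def add_quoting_py_alt (s : String) : String :=
  String.ofList (((pvTokens s.toList).map pvQuote).flatten)

-- ===== PRECONDITION & SPEC =====
def Spec_add_quoting_py (s : String) (out : String) : Prop := out = add_quoting_py_alt s
instance (s : String) (out : String) : Decidable (Spec_add_quoting_py s out) := by unfold Spec_add_quoting_py; infer_instance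

-- ===== CLAIM (what is proved, stated in full; the proofs are below) =====
def Claim_equal_add_quoting_py : Prop := ∀ (s : String), Dom_add_quoting_py s → Spec_add_quoting_py s (add_quoting_py s)

-- ===== LEMMAS AND PROOFS =====

theorem singleton_infix_iff (a : Char) (l : List Char) :
    ([a] <:+: l) ↔ a ∈ l := by
  constructor
  · rintro ⟨s, t, rfl⟩; simp
  · intro h
    obtain ⟨s, t, rfl⟩ := List.append_of_mem h
    exact ⟨s, t, by simp⟩

theorem isIn_singleton (c : Char) (l : List Char) :
    PySem.Chars.isIn [c] l = decide (c ∈ l) := by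
  by_cases h : c ∈ l
  · have h1 : PySem.Chars.isIn [c] l = true :=
      (PySem.Chars.isIn_iff_infix [c] l).mpr ((singleton_infix_iff c l).mpr h)
    simp [h1, h]
  · have h1 : PySem.Chars.isIn [c] l = false :=
      (PySem.Chars.isIn_eq_false_iff [c] l).mpr (fun hx => h ((singleton_infix_iff c l).mp hx))
    simp [h1, h]

theorem strIsalnum_singleton (c : Char) :
    PySem.Chars.strIsalnum [c] = PySem.Chars.isalnum c := by
  simp [PySem.Chars.strIsalnum]

theorem pvQuote_single (c : Char) (hc : c ≠ '\\') :
    pvQuote [c] =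
      if PySem.Chars.isalnum c || c = '_' || c = '*' || c = '?' then [c]
      else ['\\', c] := by
  simp only [pvQuote, List.head?_cons, isIn_singleton, strIsalnum_singleton]
  by_cases h1 : PySem.Chars.isalnum c = true <;>
    by_cases h2 : c = '_' <;> by_cases h3 : c = '*' <;> by_cases h4 : c = '?' <;>
      simp_all

theorem loop_eq_aux (n : Nat) :
    ∀ rem result : List Char, rem.length ≤ n →
      addqALoop rem result = result ++ ((pvTokens rem).map pvQuote).flatten := by
  induction n with
  | zero =>
    intro rem result h
    have : rem = [] := List.eq_nil_of_length_eq_zero (Nat.le_zero.mp h)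
    subst this
    rw [addqALoop.eq_def]
    simp [pvTokens]
  | succ n ih =>
    intro rem result h
    match rem with
    | [] => rw [addqALoop.eq_def]; simp [pvTokens]
    | c :: rest =>
      by_cases hc : c = '\\'
      · subst hc
        match rest with
        | [] =>
          rw [addqALoop.eq_def]
          simp only [if_true]
          rw [addqALoop.eq_def]
          simp [pvTokens, pvQuote]
        | d :: rest' =>
          rw [addqALoop.eq_def]
          have hih := fun r => ih rest' r (by simp at h; omega)
          simp [pvTokens, pvQuote, hih]
      · rw [addqALoop.eq_def]
        have hih := fun r => ih rest r (by simp at h; omega)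
        by_cases hcl : PySem.Chars.isalnum c || c = '_' || c = '*' || c = '?' <;>
          simp [pvTokens, hc, hcl, hih, pvQuote_single c hc]

theorem loop_eq (rem result : List Char) :
    addqALoop rem result = result ++ ((pvTokens rem).map pvQuote).flatten :=
  loop_eq_aux rem.length rem result (Nat.le_refl _)

-- ===== VERDICT (by name: the statement is the Claim_ definition above) =====
theorem add_quoting_py_spec : Claim_equal_add_quoting_py := by
  intro s _
  unfold Spec_add_quoting_py add_quoting_py add_quoting_py_alt
  rw [loop_eq]
  simp
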